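-- pv_equiv track=rewrite | github.com/netskopeoss/ta_cloud_exchange_plugins | tenable_ztre/utils/parser.py | _select_hostname
-- ===== SOURCE A (Python) =====
-- def _select_hostname(hostnames: list[str]) -> str | None:
--     """
--     Selects a single canonical hostname from Tenable hostnames list.
--
--     Args:
--         hostnames (list[str]): List of hostnames.
--
--     Returns:
--         str | None: Selected hostname or None if no safe choice.
--     """
--
--     if not hostnames:
--         return None
--
--     hostnames = [h.strip() for h in hostnames if h and h.strip()]
--     # Rule 1: only one hostname
--     if len(hostnames) == 1:
--         return hostnames[0]
--
--     # Rule 2: exactly one FQDN (contains '.')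
--     fqdn_hosts = [h for h in hostnames if '.' in h]
--     if len(fqdn_hosts) == 1:
--         return fqdn_hosts[0]
--
--     # Rule 3: ambiguous
--     return None
-- ===== SOURCE B (Python) =====
-- def _find_sole(hostnames, pred):
--     """Return the stripped value of the unique cleaned hostname satisfying pred,
--     or None; exits early as soon as a second candidate is seen."""
--     for i, h in enumerate(hostnames):
--         if h:
--             s = h.strip()
--             if s and pred(s):
--                 # first candidate found; any later candidate makes it ambiguous
--                 for h2 in hostnames[i + 1:]:
--                     if h2:
--                         s2 = h2.strip()
--                         if s2 and pred(s2):
--                             return None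
--                 return s
--     return None
--
--
-- def _select_hostname(hostnames: list[str]) -> str | None:
--     """Find-first-then-verify-uniqueness search, no intermediate lists."""
--     sole = _find_sole(hostnames, lambda s: True)
--     if sole is not None:
--         return sole
--     return _find_sole(hostnames, lambda s: '.' in s)
-- ===== Notes on version B (the rewrite author's own statement) =====
-- stated objective: alternative
-- what changed: Replaces A's staged list-building (clean the whole list, then build the FQDN sublist, then test lengths) with a generic early-exiting uniqueness search: find the first candidate matching a predicate and scan the remainder for a second, applied first with the trivial predicate and then with the contains-dot predicate; no intermediate lists are materialised and the scan stops at the second candidate.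
import Mathlib
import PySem

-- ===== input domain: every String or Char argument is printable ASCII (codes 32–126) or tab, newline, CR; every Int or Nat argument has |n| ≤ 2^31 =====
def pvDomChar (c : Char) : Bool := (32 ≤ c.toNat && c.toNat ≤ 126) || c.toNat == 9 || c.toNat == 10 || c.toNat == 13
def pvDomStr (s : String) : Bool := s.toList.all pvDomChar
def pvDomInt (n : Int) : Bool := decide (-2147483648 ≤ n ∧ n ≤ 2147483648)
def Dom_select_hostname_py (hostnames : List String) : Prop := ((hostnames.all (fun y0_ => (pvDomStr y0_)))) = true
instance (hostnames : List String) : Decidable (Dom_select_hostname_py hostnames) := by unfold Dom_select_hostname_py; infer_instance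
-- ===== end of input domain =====

-- B replaces A's staged list-building with a generic early-exiting find-first-then-verify-uniqueness search; same cost, different algorithm shape.

-- ===== PORT A =====
-- literal port: early return on empty, build cleaned list, then FQDN sublist, then the three rules
def select_hostname_py (hostnames : List String) : Option String :=
  if hostnames = [] then none
  else
    let cleaned := (hostnames.filter
      (fun h => decide (h ≠ "") && decide (PySem.Str.strip h ≠ ""))).map PySem.Str.strip
    if cleaned.length = 1 then PySem.List.pyGet? cleaned 0
    else
      let fqdn_hosts := cleaned.filter (fun h => PySem.Str.isIn "." h)
      if fqdn_hosts.length = 1 then PySem.List.pyGet? fqdn_hosts 0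
      else none

-- ===== PORT B =====
-- the inner early-exit loop of _find_sole over the remaining hostnames[i+1:]: a linear
-- scan returning as soon as a candidate is seen = List.any (exact)
def pvHasCand (pred : String → Bool) (xs : List String) : Bool :=
  xs.any (fun h2 => decide (h2 ≠ "") && (decide (PySem.Str.strip h2 ≠ "") && pred (PySem.Str.strip h2)))

-- the outer loop of _find_sole: advancing i = recursing on the tail (hostnames[i+1:] is the tail)
def pvFindSole (pred : String → Bool) : List String → Option String
  | [] => none
  | h :: t =>
    if h ≠ "" then
      let s := PySem.Str.strip h
      if s ≠ "" && pred s then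
        if pvHasCand pred t then none else some s
      else pvFindSole pred t
    else pvFindSole pred t

def select_hostname_py_alt (hostnames : List String) : Option String :=
  match pvFindSole (fun _ => true) hostnames with
  | some s => some s
  | none => pvFindSole (fun s => PySem.Str.isIn "." s) hostnames

-- ===== PRECONDITION & SPEC =====
def Spec_select_hostname_py (hostnames : List String) (out : Option String) : Prop := out = select_hostname_py_alt hostnames
instance (hostnames : List String) (out : Option String) : Decidable (Spec_select_hostname_py hostnames out) := by unfold Spec_select_hostname_py; infer_instance

-- ===== CLAIM (what is proved, stated in full; the proofs are below) =====
def Claim_equal_select_hostname_py : Prop := ∀ (hostnames : List String), Dom_select_hostname_py hostnames → Spec_select_hostname_py hostnames (select_hostname_py hostnames)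

-- ===== LEMMAS AND PROOFS =====

-- the cleaned-and-filtered list selected by a predicate (A's staged lists, parameterised)
def pvSel (pred : String → Bool) (xs : List String) : List String :=
  (xs.filter (fun h => decide (h ≠ "") && (decide (PySem.Str.strip h ≠ "") && pred (PySem.Str.strip h)))).map PySem.Str.strip

theorem pvHasCand_eq (pred : String → Bool) (xs : List String) :
    pvHasCand pred xs = !(pvSel pred xs).isEmpty := by
  simp only [pvHasCand, pvSel, List.isEmpty_map]
  induction xs with
  | nil => simp
  | cons h t ih =>
    by_cases hp : (decide (h ≠ "") && (decide (PySem.Str.strip h ≠ "") && pred (PySem.Str.strip h))) = true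
    · simp only [Bool.and_eq_true, decide_eq_true_eq, ne_eq] at hp
      simp [List.any_cons, hp]
    · simp only [Bool.and_eq_true, decide_eq_true_eq, ne_eq, not_and] at hp
      simp only [List.any_cons, List.filter_cons, ih]
      by_cases h1 : h = ""
      · simp [h1]
      · by_cases h2 : PySem.Str.strip h = ""
        · simp [h1, h2]
        · simp [h1, h2, hp h1 h2]

theorem pvFindSole_eq (pred : String → Bool) (xs : List String) :
    pvFindSole pred xs =
      (match pvSel pred xs with | [s] => some s | _ => none) := by
  induction xs with
  | nil => simp [pvFindSole, pvSel]
  | cons h t ih =>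
    by_cases hh : h = ""
    · have e : pvSel pred (h :: t) = pvSel pred t := by simp [pvSel, hh]
      rw [e, ← ih]; simp [pvFindSole, hh]
    · by_cases hs : PySem.Str.strip h = ""
      · have e : pvSel pred (h :: t) = pvSel pred t := by simp [pvSel, hh, hs]
        rw [e, ← ih]
        simp [pvFindSole, hh, hs]
      · by_cases hp : pred (PySem.Str.strip h) = true
        · have hsel : pvSel pred (h :: t) = PySem.Str.strip h :: pvSel pred t := by
            simp [pvSel, hh, hs, hp]
          rw [hsel]
          simp only [pvFindSole, hh, hs, hp, ne_eq, not_false_eq_true, if_true,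
            decide_true, Bool.and_self]
          rw [pvHasCand_eq]
          cases hcase : pvSel pred t with
          | nil => simp
          | cons a b => simp
        · have hsel : pvSel pred (h :: t) = pvSel pred t := by
            simp [pvSel, hh, hs, hp]
          rw [hsel, ← ih]
          simp [pvFindSole, hh, hs, hp]

theorem pvSel_true (xs : List String) :
    pvSel (fun _ => true) xs =
      (xs.filter (fun h => decide (h ≠ "") && decide (PySem.Str.strip h ≠ ""))).map PySem.Str.strip := by
  simp [pvSel]

theorem pvSel_filter (pred : String → Bool) (xs : List String) :
    (pvSel (fun _ => true) xs).filter pred = pvSel pred xs := by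
  induction xs with
  | nil => simp [pvSel]
  | cons h t ih =>
    by_cases hh : h = ""
    · have e1 : pvSel (fun _ => true) (h :: t) = pvSel (fun _ => true) t := by simp [pvSel, hh]
      have e2 : pvSel pred (h :: t) = pvSel pred t := by simp [pvSel, hh]
      rw [e1, e2, ih]
    · by_cases hs : PySem.Str.strip h = ""
      · have e1 : pvSel (fun _ => true) (h :: t) = pvSel (fun _ => true) t := by
          simp [pvSel, hh, hs]
        have e2 : pvSel pred (h :: t) = pvSel pred t := by simp [pvSel, hh, hs]
        rw [e1, e2, ih]
      · have e1 : pvSel (fun _ => true) (h :: t) = PySem.Str.strip h :: pvSel (fun _ => true) t := by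
          simp [pvSel, hh, hs]
        by_cases hp : pred (PySem.Str.strip h) = true
        · have e2 : pvSel pred (h :: t) = PySem.Str.strip h :: pvSel pred t := by
            simp [pvSel, hh, hs, hp]
          rw [e1, e2, List.filter_cons, if_pos hp, ih]
        · have e2 : pvSel pred (h :: t) = pvSel pred t := by simp [pvSel, hh, hs, hp]
          rw [e1, e2, List.filter_cons, if_neg (by simpa using hp), ih]

theorem pvRules (cleaned : List String) :
    (if cleaned.length = 1 then PySem.List.pyGet? cleaned 0
     else
       if (cleaned.filter (fun h => PySem.Str.isIn "." h)).length = 1 then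
         PySem.List.pyGet? (cleaned.filter (fun h => PySem.Str.isIn "." h)) 0
       else none)
    = (match (match cleaned with | [s] => some s | _ => none) with
       | some s => some s
       | none => (match cleaned.filter (fun h => PySem.Str.isIn "." h) with
                  | [s] => some s | _ => none)) := by
  match cleaned with
  | [] => simp
  | [a] => simp [PySem.List.pyGet?, PySem.List.pyIdx?]
  | a :: b :: t =>
    simp only [List.length_cons]
    rw [if_neg (by omega)]
    cases hf : (a :: b :: t).filter (fun h => PySem.Str.isIn "." h) with
    | nil => simp
    | cons x s =>
      cases s with
      | nil => simp [PySem.List.pyGet?, PySem.List.pyIdx?]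
      | cons y s' => simp

-- ===== VERDICT (by name: the statement is the Claim_ definition above) =====
theorem select_hostname_py_spec : Claim_equal_select_hostname_py := by
  intro hostnames _
  unfold Spec_select_hostname_py select_hostname_py select_hostname_py_alt
  rw [pvFindSole_eq, pvFindSole_eq, ← pvSel_filter (fun s => PySem.Str.isIn "." s), pvSel_true]
  by_cases hnil : hostnames = []
  · subst hnil; rfl
  · rw [if_neg hnil]
    exact pvRules _
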